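-- pv_equiv track=rewrite | github.com/notjacobjun/Leetcode | concat_sum.py | solution
-- ===== SOURCE A (Python) =====
-- def solution(a):
--     """
--     parameters:
--     a: This is a list of integers to be concat-summed
--     Time: O(n)
--     Space: O(n)
--     """
--     sum, list_sum = 0, 0
--     # create a var for the sum of all the nums in a (we are going to add this after iterating through each element in a)
--     for num in a:
--         list_sum += num
--
--     # create the digit count map
--     digit_count = [len(str(n)) for n in a]
--
--     # scan through each element in a to count
--     for num in a:
--         for dc in digit_count:
--             sum += num * (10 ** dc)
--         sum += list_sum
--
--     return sum
-- ===== SOURCE B (Python) =====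
-- def solution(a):
--     # Same concat-sum, computed in O(n): factor the double loop into
--     # (sum a) * (sum of 10**digits) + n * (sum a).
--     total = sum(a)
--     pow_sum = 0
--     for n in a:
--         pow_sum += 10 ** len(str(n))
--     return total * pow_sum + len(a) * total
-- ===== Notes on version B (the rewrite author's own statement) =====
-- stated objective: faster
-- what changed: Replaces the quadratic double loop over all (num, digit-count) pairs by one pass computing sum(a) and sum(10**digits), combined in the closed form total*pow_sum + n*total.
import Mathlib
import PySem

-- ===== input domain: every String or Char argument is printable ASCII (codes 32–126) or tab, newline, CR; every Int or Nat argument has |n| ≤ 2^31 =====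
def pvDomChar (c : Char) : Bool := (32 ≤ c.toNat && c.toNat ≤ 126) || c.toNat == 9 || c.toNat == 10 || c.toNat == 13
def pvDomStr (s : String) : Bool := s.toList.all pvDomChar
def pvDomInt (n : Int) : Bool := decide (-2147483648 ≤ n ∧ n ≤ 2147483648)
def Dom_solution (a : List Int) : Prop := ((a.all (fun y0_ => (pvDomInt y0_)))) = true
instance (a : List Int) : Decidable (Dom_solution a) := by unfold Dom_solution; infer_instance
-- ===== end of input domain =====

-- B replaces A's quadratic double loop with one pass and the closed form total*pow_sum + n*total (measurably faster, asymptotic).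

-- ===== PORT A =====
def solution (a : List Int) : Int :=
  let list_sum : Int := a.foldl (fun s num => s + num) 0
  let digit_count : List Nat := a.map (fun n => (PySem.Int.toChars n).length)
  a.foldl (fun sum num =>
    (digit_count.foldl (fun s dc => s + num * (10:Int)^dc) sum) + list_sum) 0

-- ===== PORT B =====
def solution_alt (a : List Int) : Int :=
  let total : Int := a.sum
  let pow_sum : Int := a.foldl (fun p n => p + (10:Int)^(PySem.Int.toChars n).length) 0
  total * pow_sum + (a.length : Int) * total

-- ===== PRECONDITION & SPEC =====
def Spec_solution (a : List Int) (out : Int) : Prop := out = solution_alt a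
instance (a : List Int) (out : Int) : Decidable (Spec_solution a out) := by unfold Spec_solution; infer_instance

-- ===== CLAIM (what is proved, stated in full; the proofs are below) =====
def Claim_equal_solution : Prop := ∀ (a : List Int), Dom_solution a → Spec_solution a (solution a)

-- ===== LEMMAS AND PROOFS =====

-- A's inner loop adds num * (sum of the powers) to the accumulator.
lemma inner_loop (l : List Nat) (num : Int) : ∀ s : Int,
    l.foldl (fun s dc => s + num * (10:Int)^dc) s
      = s + num * (l.map (fun dc => (10:Int)^dc)).sum := by
  induction l with
  | nil => intro s; simp
  | cons x xs ih => intro s; simp [List.foldl, ih]; ring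

-- A's outer loop: each iteration adds num * P + L (by inner_loop), so it is
-- (sum of nums) * P + (length) * L over the accumulator.
lemma outer_loop (dcs : List Nat) (L : Int) (a : List Int) : ∀ s : Int,
    a.foldl (fun sum num =>
      (dcs.foldl (fun s dc => s + num * (10:Int)^dc) sum) + L) s
      = s + a.sum * (dcs.map (fun dc => (10:Int)^dc)).sum + (a.length : Int) * L := by
  induction a with
  | nil => intro s; simp
  | cons x xs ih => intro s; rw [List.foldl_cons, inner_loop, ih]; simp only [List.sum_cons, List.length_cons]; push_cast; ring

-- B's pow_sum fold equals the mapped sum used in inner_loop.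
lemma pow_sum_fold (a : List Int) : ∀ p : Int,
    a.foldl (fun p n => p + (10:Int)^(PySem.Int.toChars n).length) p
      = p + ((a.map (fun n => (PySem.Int.toChars n).length)).map
              (fun dc => (10:Int)^dc)).sum := by
  induction a with
  | nil => intro p; simp
  | cons x xs ih => intro p; simp [List.foldl, ih]; ring

-- A's first loop is List.sum.
lemma sum_fold (a : List Int) : ∀ s : Int,
    a.foldl (fun s num => s + num) s = s + a.sum := by
  induction a with
  | nil => intro s; simp
  | cons x xs ih => intro s; simp [List.foldl, ih]; ring

-- ===== VERDICT (by name: the statement is the Claim_ definition above) =====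
theorem solution_spec : Claim_equal_solution := by
  intro a _
  unfold Spec_solution solution solution_alt
  simp only [sum_fold, pow_sum_fold, zero_add]
  rw [outer_loop (a.map (fun n => (PySem.Int.toChars n).length)) a.sum a 0]
  ring
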